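-- pv_equiv track=rewrite | github.com/EightBitBoot/qndos | drill_down_formatter.py | process_one
-- ===== SOURCE A (Python) =====
-- def process_one(dot_oid):
--     result = "DRILL_DOWN_OID = ["
--
--     split_oid = dot_oid.split(".")
--
--     for i in range(1, len(split_oid) + 1):
--         result += f'"{".".join(split_oid[0:i])}"'
--
--         if i != len(split_oid):
--             result += ", "
--
--     result += "]"
--
--     return result
-- ===== SOURCE B (Python) =====
-- def process_one(dot_oid):
--     split_oid = dot_oid.split(".")
--
--     prefix = split_oid[0]
--     parts = ['"' + prefix + '"']
--     for seg in split_oid[1:]: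
--         prefix = prefix + "." + seg
--         parts.append('"' + prefix + '"')
--
--     return "DRILL_DOWN_OID = [" + ", ".join(parts) + "]"
-- ===== Notes on version B (the rewrite author's own statement) =====
-- stated objective: simpler
-- what changed: Replaces the index loop that re-joins split_oid[0:i] from scratch on every iteration (and the manual not-last comma branch) with a single pass that extends a running prefix string, collecting quoted parts and emitting them with one comma-separated join.
import Mathlib
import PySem

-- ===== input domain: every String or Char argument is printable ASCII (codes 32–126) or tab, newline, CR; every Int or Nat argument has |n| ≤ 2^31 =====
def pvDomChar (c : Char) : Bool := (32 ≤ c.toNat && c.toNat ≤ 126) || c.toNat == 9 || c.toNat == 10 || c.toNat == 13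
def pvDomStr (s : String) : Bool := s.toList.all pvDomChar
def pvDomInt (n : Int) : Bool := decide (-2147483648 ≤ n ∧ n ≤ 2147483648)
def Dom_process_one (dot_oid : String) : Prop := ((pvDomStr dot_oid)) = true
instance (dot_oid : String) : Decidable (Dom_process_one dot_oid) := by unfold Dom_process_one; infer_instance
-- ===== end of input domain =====

-- B replaces A's index loop that re-joins split_oid[0:i] from scratch each iteration (and the
-- manual "not last" comma branch) by one pass extending a running prefix, emitted via ", ".join
-- (objective: simpler).

-- ===== PORT A =====
def process_one (dot_oid : String) : String :=
  let result := "DRILL_DOWN_OID = [".toList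
  let split_oid := PySem.Chars.splitOn dot_oid.toList ['.']
  let result := (PySem.List.pyRange 1 ((split_oid.length : Int) + 1) 1).foldl
    (fun res i =>
      let res := res ++ ('"' :: PySem.Chars.join ['.'] (PySem.List.slice split_oid (some 0) (some i)) ++ ['"'])
      if i ≠ (split_oid.length : Int) then res ++ ", ".toList else res)
    result
  String.mk (result ++ "]".toList)

-- ===== PORT B =====
def process_one_alt (dot_oid : String) : String :=
  match PySem.Chars.splitOn dot_oid.toList ['.'] with
  | [] => ""   -- unreachable: Python's str.split never returns an empty list
  | s :: rest =>
      let fin := rest.foldl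
        (fun (st : List Char × List (List Char)) seg =>
          let pre := st.1 ++ '.' :: seg
          (pre, st.2 ++ ['"' :: pre ++ ['"']]))
        (s, ['"' :: s ++ ['"']])
      String.mk ("DRILL_DOWN_OID = [".toList ++ PySem.Chars.join ", ".toList fin.2 ++ "]".toList)

-- ===== PRECONDITION & SPEC =====
def Spec_process_one (dot_oid : String) (out : String) : Prop := out = process_one_alt dot_oid
instance (dot_oid : String) (out : String) : Decidable (Spec_process_one dot_oid out) := by unfold Spec_process_one; infer_instance

-- ===== CLAIM (what is proved, stated in full; the proofs are below) =====
def Claim_equal_process_one : Prop := ∀ (dot_oid : String), Dom_process_one dot_oid → Spec_process_one dot_oid (process_one dot_oid)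

-- ===== LEMMAS AND PROOFS =====

-- splitOn never returns the empty list (its Python s.split(sep) always yields ≥ 1 piece)
theorem pv_go_ne_nil (sep : List Char) : ∀ (fuel : Nat) (l cur : List Char) (acc : List (List Char)),
    PySem.Chars.splitOn.go sep fuel l cur acc ≠ [] := by
  intro fuel
  induction fuel with
  | zero => intro l cur acc; simp [PySem.Chars.splitOn.go]
  | succ n ih =>
    intro l cur acc
    match l with
    | [] => simp [PySem.Chars.splitOn.go]
    | c :: rest =>
      rw [PySem.Chars.splitOn.go]
      split
      · exact ih _ _ _
      · exact ih _ _ _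

theorem pv_splitOn_ne_nil (s sep : List Char) : PySem.Chars.splitOn s sep ≠ [] := by
  unfold PySem.Chars.splitOn; exact pv_go_ne_nil _ _ _ _ _

-- the chain of cumulative dot-joined prefixes strictly after the seed p
def pvTchain (p : List Char) : List (List Char) → List (List Char)
  | [] => []
  | s :: rest => (p ++ '.' :: s) :: pvTchain (p ++ '.' :: s) rest

theorem pvTchain_map : ∀ (rest : List (List Char)) (p x : List Char),
    (pvTchain p rest).map (fun q => x ++ q) = pvTchain (x ++ p) rest := by
  intro rest
  induction rest with
  | nil => intro p x; rfl
  | cons t r ih =>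
    intro p x
    simp only [pvTchain, List.map_cons, ih (p ++ '.' :: t) x, List.append_assoc]

-- the heads of A's slices: join('.', full[0:k+1]) traverses exactly the prefix chain
theorem pv_take_chain : ∀ (rest : List (List Char)) (s : List Char),
    (List.range (rest.length + 1)).map
        (fun k => PySem.Chars.join ['.'] ((s :: rest).take (k + 1)))
      = s :: pvTchain s rest := by
  intro rest
  induction rest with
  | nil =>
    intro s
    simp [PySem.Chars.join_singleton, pvTchain]
  | cons t r ih =>
    intro s
    rw [show (t :: r).length + 1 = (r.length + 1) + 1 from rfl, List.range_succ_eq_map]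
    simp only [List.map_cons, List.map_map]
    refine congrArg₂ _ (by simp [PySem.Chars.join_singleton]) ?_
    have h1 : ∀ k : Nat,
        PySem.Chars.join ['.'] ((s :: t :: r).take (k + 1 + 1))
          = (s ++ ['.']) ++ PySem.Chars.join ['.'] ((t :: r).take (k + 1)) := by
      intro k
      simp only [List.take_succ_cons]
      rw [PySem.Chars.join_cons_cons]
    calc (List.range (r.length + 1)).map
            ((fun k => PySem.Chars.join ['.'] ((s :: t :: r).take (k + 1))) ∘ Nat.succ)
        = (List.range (r.length + 1)).map
            (fun k => (s ++ ['.']) ++ PySem.Chars.join ['.'] ((t :: r).take (k + 1))) := by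
          refine List.map_congr_left ?_; intro k _; exact h1 k
      _ = ((List.range (r.length + 1)).map
            (fun k => PySem.Chars.join ['.'] ((t :: r).take (k + 1)))).map
            (fun q => (s ++ ['.']) ++ q) := by rw [List.map_map]; rfl
      _ = (t :: pvTchain t r).map (fun q => (s ++ ['.']) ++ q) := by rw [ih t]
      _ = (s ++ '.' :: t) :: pvTchain (s ++ '.' :: t) r := by
          simp only [List.map_cons, pvTchain_map]
          simp

-- A's comma logic: flatMap with an "except the last index" separator is a join
theorem pv_flat_sep (sep : List Char) (f : Int → List Char) :
    ∀ (k : Nat) (a n : Int), n = a + k →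
      (PySem.List.pyRange a (n + 1) 1).flatMap
          (fun i => f i ++ if i ≠ n then sep else [])
        = PySem.Chars.join sep ((PySem.List.pyRange a (n + 1) 1).map f) := by
  intro k
  induction k with
  | zero =>
    intro a n hn
    subst hn
    simp [PySem.List.pyRange_one_singleton, PySem.Chars.join_singleton]
  | succ k ih =>
    intro a n hn
    rw [PySem.List.pyRange_one_cons (by omega : a < n + 1)]
    have hne : a ≠ n := by omega
    have hcons : PySem.List.pyRange (a + 1) (n + 1) 1
        = (a + 1) :: PySem.List.pyRange (a + 1 + 1) (n + 1) 1 :=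
      PySem.List.pyRange_one_cons (by omega)
    have ihr := ih (a + 1) n (by omega)
    simp only [List.flatMap_cons, List.map_cons, if_pos hne, ihr]
    rw [hcons]
    simp only [List.map_cons]
    rw [PySem.Chars.join_cons_cons]

-- B's loop invariant: the parts accumulator collects the quoted prefix chain
theorem pv_B_loop : ∀ (rest : List (List Char)) (p : List Char) (ps : List (List Char)),
    (rest.foldl
        (fun (st : List Char × List (List Char)) seg =>
          let pre := st.1 ++ '.' :: seg
          (pre, st.2 ++ ['"' :: pre ++ ['"']]))
        (p, ps)).2
      = ps ++ (pvTchain p rest).map (fun q => '"' :: q ++ ['"']) := by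
  intro rest
  induction rest with
  | nil => intro p ps; simp [pvTchain]
  | cons t r ih =>
    intro p ps
    simp only [List.foldl_cons, pvTchain, List.map_cons]
    rw [ih]
    simp

theorem process_one_eq (dot_oid : String) : process_one dot_oid = process_one_alt dot_oid := by
  unfold process_one process_one_alt
  cases hsp : PySem.Chars.splitOn dot_oid.toList ['.'] with
  | nil => exact absurd hsp (pv_splitOn_ne_nil _ _)
  | cons s rest =>
    simp only
    congr 1
    rw [pv_B_loop]
    -- rewrite A's loop body as acc ++ g i
    have hfun : (fun (res : List Char) (i : Int) =>
        let res := res ++ ('"' :: PySem.Chars.join ['.'] (PySem.List.slice (s :: rest) (some 0) (some i)) ++ ['"'])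
        if i ≠ ((s :: rest).length : Int) then res ++ ", ".toList else res)
        = fun (res : List Char) (i : Int) => res ++
            (('"' :: PySem.Chars.join ['.'] (PySem.List.slice (s :: rest) (some 0) (some i)) ++ ['"'])
              ++ if i ≠ ((s :: rest).length : Int) then ", ".toList else []) := by
      funext res i
      have hl : ((s :: rest).length : Int) = (rest.length : Int) + 1 := by simp
      rw [hl]
      by_cases h : i = (rest.length : Int) + 1 <;> simp [h]
    -- the mapped pyRange is the quoted prefix chain
    have hmaps : (PySem.List.pyRange 1 (((s :: rest).length : Int) + 1) 1).map
        (fun i => '"' :: PySem.Chars.join ['.'] (PySem.List.slice (s :: rest) (some 0) (some i)) ++ ['"'])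
        = ('"' :: s ++ ['"']) :: (pvTchain s rest).map (fun q => '"' :: q ++ ['"']) := by
      rw [PySem.List.pyRange_one]
      have hlen : ((((s :: rest).length : Int) + 1) - 1).toNat = rest.length + 1 := by
        simp
      rw [hlen, List.map_map]
      have hmap : ∀ k ∈ List.range (rest.length + 1),
          ((fun i => '"' :: PySem.Chars.join ['.'] (PySem.List.slice (s :: rest) (some 0) (some i)) ++ ['"'])
            ∘ fun k : Nat => (1 : Int) + k) k
          = ((fun q => '"' :: q ++ ['"']) ∘ (fun k => PySem.Chars.join ['.'] ((s :: rest).take (k + 1)))) k := by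
        intro k _
        have h1 : (1 : Int) + (k : Int) = ((k + 1 : Nat) : Int) := by push_cast; ring
        simp only [Function.comp_apply, h1, PySem.List.slice_zero_start, PySem.List.slice_to_natCast]
      rw [List.map_congr_left hmap]
      rw [← List.map_map]
      rw [pv_take_chain rest s]
      simp
    rw [hfun, PySem.List.foldl_append_eq_flatMap,
        pv_flat_sep (", ".toList)
          (fun i => '"' :: PySem.Chars.join ['.'] (PySem.List.slice (s :: rest) (some 0) (some i)) ++ ['"'])
          rest.length 1 ((s :: rest).length : Int) (by simp; omega),
        hmaps]
    simp

-- ===== VERDICT (by name: the statement is the Claim_ definition above) =====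
theorem process_one_spec : Claim_equal_process_one := by
  intro dot_oid _
  unfold Spec_process_one
  exact process_one_eq dot_oid
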